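-- pv_equiv track=rewrite | github.com/Despenrado/python_lessons | indiana/labyrinth.py | labyrinth_to_string
-- ===== SOURCE A (Python) =====
-- CHAR_INDIANA = '@'
--
-- CHAR_WALL = '#'
--
-- CHAR_FREE = '.'
--
-- def labyrinth_to_string(m, pos):
--     y_len, x_len = shape(m)
--     labyrinth = ''
--
--     for y in range(y_len):
--         for x in range(x_len):
--             if y == pos[0] and x == pos[1]:
--                 labyrinth += CHAR_INDIANA
--             elif m[y][x]:
--                 labyrinth += CHAR_FREE
--             else:
--                 labyrinth += CHAR_WALL
--         labyrinth += '\n'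
--
--     return labyrinth
--
-- def shape(m):
--     return len(m), len(m[0])
-- ===== SOURCE B (Python) =====
-- CHAR_INDIANA = '@'
-- CHAR_WALL = '#'
-- CHAR_FREE = '.'
--
-- def labyrinth_to_string(m, pos):
--     x_len = len(m[0])
--     lines = [''.join(CHAR_FREE if c else CHAR_WALL for c in row[:x_len]) for row in m]
--     grid = '\n'.join(lines) + '\n'
--     y, x = pos
--     if 0 <= y < len(m) and 0 <= x < x_len:
--         cells = list(grid)
--         cells[y * (x_len + 1) + x] = CHAR_INDIANA
--         grid = ''.join(cells)
--     return grid
-- ===== Notes on version B (the rewrite author's own statement) =====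
-- stated objective: alternative
-- what changed: B renders the labyrinth in one pass (a join per row mapping cells to '.'/'#', rows joined by newlines) and then patches the player character in at its flat index only when pos is in bounds, instead of A's per-cell player-position test inside nested loops with repeated string concatenation.
-- outside the precondition, e.g. on labyrinth_to_string([], (0, 0)): A raises IndexError, B raises IndexError; on labyrinth_to_string([[1, 1], [1]], (0, 0)): A raises IndexError, B returns '@.\n.\n'; on labyrinth_to_string([[1, 1], [1]], (1, 1)): A returns '..\n.@\n', B returns '..\n.@'
import Mathlib
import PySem

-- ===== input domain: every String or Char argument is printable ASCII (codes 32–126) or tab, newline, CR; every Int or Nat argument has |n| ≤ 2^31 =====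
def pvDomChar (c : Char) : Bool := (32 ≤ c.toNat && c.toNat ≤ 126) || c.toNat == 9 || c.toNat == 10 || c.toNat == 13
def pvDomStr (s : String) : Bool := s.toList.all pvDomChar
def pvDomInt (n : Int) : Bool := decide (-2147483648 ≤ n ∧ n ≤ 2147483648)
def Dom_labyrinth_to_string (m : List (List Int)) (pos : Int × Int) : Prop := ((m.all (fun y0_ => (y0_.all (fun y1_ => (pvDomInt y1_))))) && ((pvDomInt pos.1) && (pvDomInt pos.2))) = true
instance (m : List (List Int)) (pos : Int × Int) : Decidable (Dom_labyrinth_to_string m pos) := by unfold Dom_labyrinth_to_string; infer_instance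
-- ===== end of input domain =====

-- B renders the grid first (one join per row, newline-joined) and then patches the player's
-- single character in when pos is in bounds, instead of testing the player at every cell.

-- ===== PORT A =====
-- helper 'shape' of the Python module; m[0] via pyGetD under Pre_ (m ≠ [])
def pyShape (m : List (List Int)) : Int × Int :=
  ((m.length : Int), ((PySem.List.pyGetD m 0 ([] : List Int)).length : Int))

def labyrinth_to_string (m : List (List Int)) (pos : Int × Int) : String :=
  let s := pyShape m
  let y_len := s.1
  let x_len := s.2
  let labyrinth : List Char := []
  let labyrinth := (PySem.List.pyRange 0 y_len 1).foldl (fun lab y =>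
    let lab := (PySem.List.pyRange 0 x_len 1).foldl (fun lab x =>
      if y = pos.1 ∧ x = pos.2 then lab ++ ['@']
      else if PySem.List.pyGetD (PySem.List.pyGetD m y ([] : List Int)) x 0 ≠ 0 then lab ++ ['.']
      else lab ++ ['#']) lab
    lab ++ ['\n']) labyrinth
  String.mk labyrinth

-- ===== PORT B =====
def labyrinth_to_string_alt (m : List (List Int)) (pos : Int × Int) : String :=
  let x_len : Int := ((PySem.List.pyGetD m 0 ([] : List Int)).length : Int)
  -- row[:x_len] is PySem.List.slice; '\n'.join(lines) + '\n' on char lists is List.intercalate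
  let lines : List (List Char) :=
    m.map (fun row => (PySem.List.slice row none (some x_len)).map (fun c => if c ≠ 0 then '.' else '#'))
  let grid : List Char := List.intercalate ['\n'] lines ++ ['\n']
  let grid :=
    if 0 ≤ pos.1 ∧ pos.1 < (m.length : Int) ∧ 0 ≤ pos.2 ∧ pos.2 < x_len then
      PySem.List.pySetD grid (pos.1 * (x_len + 1) + pos.2) '@'
    else grid
  String.mk grid

-- ===== PRECONDITION & SPEC =====
-- Pre_ excludes the empty grid (A's shape raises IndexError on m[0]) and ragged grids with a row
-- shorter than len(m[0]) (A raises IndexError there, except in the accidental case where every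
-- missing cell is exactly the player's position, an artefact of A's scan order).
def Pre_labyrinth_to_string (m : List (List Int)) (pos : Int × Int) : Prop :=
  m ≠ [] ∧ ∀ row ∈ m, (m.headD []).length ≤ row.length
instance (m : List (List Int)) (pos : Int × Int) : Decidable (Pre_labyrinth_to_string m pos) := by
  unfold Pre_labyrinth_to_string; infer_instance

def pvWitness_labyrinth_to_string : List (List Int) × (Int × Int) := ([[1, 0], [0, 1]], (0, 1))

def Spec_labyrinth_to_string (m : List (List Int)) (pos : Int × Int) (out : String) : Prop := out = labyrinth_to_string_alt m pos
instance (m : List (List Int)) (pos : Int × Int) (out : String) : Decidable (Spec_labyrinth_to_string m pos out) := by unfold Spec_labyrinth_to_string; infer_instance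

-- ===== CLAIM (what is proved, stated in full; the proofs are below) =====
def Claim_equal_labyrinth_to_string : Prop := ∀ (m : List (List Int)) (pos : Int × Int), Dom_labyrinth_to_string m pos → Pre_labyrinth_to_string m pos → Spec_labyrinth_to_string m pos (labyrinth_to_string m pos)

-- ===== LEMMAS AND PROOFS =====

-- canonical building blocks shared by both reductions
def pvL (m : List (List Int)) : Nat := (PySem.List.pyGetD m 0 ([] : List Int)).length
def pvCell (z : Int) : Char := if z ≠ 0 then '.' else '#'
def pvLine (m : List (List Int)) (y : Nat) : List Char := ((m.getD y []).take (pvL m)).map pvCell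
def pvBlocks (m : List (List Int)) : List (List Char) :=
  (List.range m.length).map (fun y => pvLine m y ++ ['\n'])
def pvFA (m : List (List Int)) (pos : Int × Int) (y : Int) (x : Nat) : Char :=
  if y = pos.1 ∧ (x : Int) = pos.2 then '@'
  else if PySem.List.pyGetD (PySem.List.pyGetD m y ([] : List Int)) (x : Int) 0 ≠ 0 then '.' else '#'
def pvRowA (m : List (List Int)) (pos : Int × Int) (y : Int) : List Char :=
  (List.range (pvL m)).map (pvFA m pos y)

lemma pv_foldl_append_singleton {α : Type} (l : List α) (f : α → Char) (acc : List Char) :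
    l.foldl (fun lab x => lab ++ [f x]) acc = acc ++ l.map f := by
  induction l generalizing acc with
  | nil => simp
  | cons a t ih => simp [ih]

lemma pv_foldl_append_blocks {α : Type} (l : List α) (h : α → List Char) (acc : List Char) :
    l.foldl (fun lab y => lab ++ h y) acc = acc ++ (l.map h).flatten := by
  induction l generalizing acc with
  | nil => simp
  | cons a t ih => simp [ih]

lemma pv_A_eq (m : List (List Int)) (pos : Int × Int) :
    labyrinth_to_string m pos =
      String.mk (((List.range m.length).map (fun (y : Nat) => pvRowA m pos (y : Int) ++ ['\n'])).flatten) := by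
  unfold labyrinth_to_string pyShape
  simp only []
  congr 1
  have hinner : ∀ (y : Int) (lab : List Char),
      (PySem.List.pyRange 0 ((PySem.List.pyGetD m 0 ([] : List Int)).length : Int) 1).foldl
        (fun lab x =>
          if y = pos.1 ∧ x = pos.2 then lab ++ ['@']
          else if PySem.List.pyGetD (PySem.List.pyGetD m y ([] : List Int)) x 0 ≠ 0 then lab ++ ['.']
          else lab ++ ['#']) lab = lab ++ pvRowA m pos y := by
    intro y lab
    rw [PySem.List.pyRange_zero_nat, List.foldl_map]
    have hb : (fun (lab : List Char) (x : Nat) =>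
        if y = pos.1 ∧ (x : Int) = pos.2 then lab ++ ['@']
        else if PySem.List.pyGetD (PySem.List.pyGetD m y ([] : List Int)) (x : Int) 0 ≠ 0 then lab ++ ['.']
        else lab ++ ['#']) = fun lab x => lab ++ [pvFA m pos y x] := by
      funext lab x
      unfold pvFA
      split_ifs <;> rfl
    rw [hb, pv_foldl_append_singleton]
    rfl
  have hout : (fun (lab : List Char) (y : Int) =>
      ((PySem.List.pyRange 0 ((PySem.List.pyGetD m 0 ([] : List Int)).length : Int) 1).foldl
        (fun lab x =>
          if y = pos.1 ∧ x = pos.2 then lab ++ ['@']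
          else if PySem.List.pyGetD (PySem.List.pyGetD m y ([] : List Int)) x 0 ≠ 0 then lab ++ ['.']
          else lab ++ ['#']) lab) ++ ['\n']) =
      fun lab y => lab ++ (pvRowA m pos y ++ ['\n']) := by
    funext lab y
    rw [hinner]
    simp
  rw [hout, pv_foldl_append_blocks, PySem.List.pyRange_zero_nat, List.map_map]
  simp only [List.nil_append]
  rfl

lemma pv_intercalate_flatten (l : List (List Char)) (c : Char) (h : l ≠ []) :
    List.intercalate [c] l ++ [c] = (l.map (· ++ [c])).flatten := by
  induction l with
  | nil => simp at h
  | cons a t ih =>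
    cases t with
    | nil => simp [List.intercalate]
    | cons b u =>
      have hstep : List.intercalate [c] (a :: b :: u) = a ++ [c] ++ List.intercalate [c] (b :: u) := by
        simp [List.intercalate]
      rw [hstep, List.map_cons, List.flatten_cons, List.append_assoc, ih (by simp)]

lemma pv_line_len (m : List (List Int)) (y : Nat)
    (hy : y < m.length) (hrow : ∀ row ∈ m, (m.headD []).length ≤ row.length) :
    (pvLine m y).length = pvL m := by
  have hL : pvL m = (m.headD []).length := by
    unfold pvL
    rw [PySem.List.pyGetD_zero]
    cases m <;> rfl
  have hmem : m.getD y [] ∈ m := by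
    rw [List.getD_eq_getElem _ _ hy]; exact List.getElem_mem hy
  have hge := hrow _ hmem
  unfold pvLine
  rw [List.length_map, List.length_take]
  omega

lemma pv_grid_eq (m : List (List Int)) (hne : m ≠ []) :
    List.intercalate ['\n']
        (m.map (fun row => (PySem.List.slice row none (some ((pvL m : Nat) : Int))).map pvCell)) ++ ['\n'] =
      (pvBlocks m).flatten := by
  have hmap : m.map (fun row => (PySem.List.slice row none (some ((pvL m : Nat) : Int))).map pvCell) =
      (List.range m.length).map (fun y => pvLine m y) := by
    apply List.ext_getElem
    · simp
    · intro i h1 h2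
      simp only [List.getElem_map, List.getElem_range]
      rw [PySem.List.slice_to_natCast]
      unfold pvLine
      rw [List.getD_eq_getElem _ _ (by simpa using h1)]
  rw [hmap, pv_intercalate_flatten _ _ (by simpa using hne)]
  unfold pvBlocks
  rw [List.map_map]
  rfl

lemma pv_set_map_range {α : Type} (n : Nat) (f : Nat → α) (k : Nat) (v : α) (hk : k < n) :
    ((List.range n).map f).set k v = (List.range n).map (fun j => if j = k then v else f j) := by
  apply List.ext_getElem
  · simp
  · intro i h1 h2
    simp only [List.getElem_set, List.getElem_map, List.getElem_range]
    by_cases h : k = i <;> simp [h] <;> omega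

lemma pv_set_append_left {α : Type} (l t : List α) (i : Nat) (v : α) (h : i < l.length) :
    (l ++ t).set i v = l.set i v ++ t := by
  rw [List.set_append]
  simp [h]

lemma pv_flatten_set (blocks : List (List Char)) (K : Nat)
    (hK : ∀ b ∈ blocks, b.length = K) (y x : Nat) (hy : y < blocks.length) (hx : x < K) (v : Char) :
    (blocks.flatten).set (y * K + x) v = (blocks.set y ((blocks.getD y []).set x v)).flatten := by
  induction blocks generalizing y with
  | nil => simp at hy
  | cons b t ih =>
    have hb : b.length = K := hK b (by simp)
    cases y with
    | zero =>
      simp only [List.flatten_cons, Nat.zero_mul, Nat.zero_add, List.set_cons_zero, List.getD_cons_zero]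
      rw [pv_set_append_left _ _ _ _ (by omega)]
    | succ y' =>
      simp only [List.flatten_cons, List.set_cons_succ, List.getD_cons_succ]
      rw [List.set_append]
      have hge : ¬ (y' + 1) * K + x < b.length := by
        rw [hb]; nlinarith [Nat.succ_mul y' K]
      simp only [if_neg hge]
      have harith : (y' + 1) * K + x - b.length = y' * K + x := by
        rw [hb, Nat.succ_mul]; omega
      rw [harith, ih (fun b hb => hK b (by simp [hb])) y' (by simpa using hy)]

lemma pv_rowA_elem (m : List (List Int)) (pos : Int × Int) (y : Nat)
    (hy : y < m.length) (hrow : ∀ row ∈ m, (m.headD []).length ≤ row.length) :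
    pvRowA m pos (y : Int) =
      if (y : Int) = pos.1 ∧ 0 ≤ pos.2 ∧ pos.2 < (pvL m : Int)
      then (pvLine m y).set pos.2.toNat '@' else pvLine m y := by
  have hlen : (pvLine m y).length = pvL m := pv_line_len m y hy hrow
  have hL : pvL m ≤ (m.getD y []).length := by
    have hmem : m.getD y [] ∈ m := by
      rw [List.getD_eq_getElem _ _ hy]; exact List.getElem_mem hy
    have := hrow _ hmem
    have hL' : pvL m = (m.headD []).length := by
      unfold pvL; rw [PySem.List.pyGetD_zero]; cases m <;> rfl
    omega
  have hcellk : ∀ k, k < pvL m → ∀ (h : k < (pvRowA m pos (y:Int)).length),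
      (pvRowA m pos (y:Int))[k] =
        if (y:Int) = pos.1 ∧ (k : Int) = pos.2 then '@' else pvCell ((m.getD y []).getD k 0) := by
    intro k hk h
    have hrowAk : (pvRowA m pos (y:Int))[k] = pvFA m pos (y:Int) k := by
      unfold pvRowA
      simp
    rw [hrowAk]
    unfold pvFA
    rw [PySem.List.pyGetD_natCast, PySem.List.pyGetD_natCast]
    split_ifs <;> first | rfl | (unfold pvCell; split_ifs <;> rfl) | tauto
  have hlinek : ∀ k, k < pvL m → ∀ (h : k < (pvLine m y).length),
      (pvLine m y)[k] = pvCell ((m.getD y []).getD k 0) := by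
    intro k hk h
    unfold pvLine
    simp only [List.getElem_map, List.getElem_take]
    rw [List.getD_eq_getElem _ _ (show k < (m.getD y []).length by omega)]
  by_cases hcond : (y : Int) = pos.1 ∧ 0 ≤ pos.2 ∧ pos.2 < (pvL m : Int)
  · rw [if_pos hcond]
    obtain ⟨hyy, h02, hlt⟩ := hcond
    apply List.ext_getElem
    · unfold pvRowA
      simp [hlen]
    · intro k h1 h2
      have hk : k < pvL m := by unfold pvRowA at h1; simpa using h1
      rw [hcellk k hk h1, List.getElem_set]
      by_cases hkk : (k : Int) = pos.2
      · rw [if_pos ⟨hyy, hkk⟩, if_pos (by omega)]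
      · rw [if_neg (by tauto), if_neg (by omega), hlinek k hk (by omega)]
  · rw [if_neg hcond]
    apply List.ext_getElem
    · unfold pvRowA
      simp [hlen]
    · intro k h1 h2
      have hk : k < pvL m := by unfold pvRowA at h1; simpa using h1
      rw [hcellk k hk h1, hlinek k hk h2]
      rw [if_neg]
      intro ⟨hc1, hc2⟩
      exact hcond ⟨hc1, by omega, by omega⟩

-- ===== VERDICT (by name: the statement is the Claim_ definition above) =====
theorem labyrinth_to_string_spec : Claim_equal_labyrinth_to_string := by
  intro m pos _ hpre
  obtain ⟨hne, hrow⟩ := hpre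
  unfold Spec_labyrinth_to_string
  rw [pv_A_eq]
  unfold labyrinth_to_string_alt
  simp only []
  rw [show ((PySem.List.pyGetD m 0 ([] : List Int)).length : Int) = ((pvL m : Nat) : Int) from rfl]
  rw [show (fun (c : Int) => if c ≠ 0 then '.' else '#') = pvCell from rfl]
  rw [pv_grid_eq m hne]
  have hblockK : ∀ b ∈ pvBlocks m, b.length = pvL m + 1 := by
    intro b hb
    unfold pvBlocks at hb
    simp only [List.mem_map, List.mem_range] at hb
    obtain ⟨y, hy, rfl⟩ := hb
    simp [pv_line_len m y hy hrow]
  by_cases hin : 0 ≤ pos.1 ∧ pos.1 < (m.length : Int) ∧ 0 ≤ pos.2 ∧ pos.2 < ((pvL m : Nat) : Int)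
  · rw [if_pos hin]
    obtain ⟨h1, h2, h3, h4⟩ := hin
    set y0 := pos.1.toNat with hy0
    set x0 := pos.2.toNat with hx0
    have hp1 : pos.1 = (y0 : Int) := by omega
    have hp2 : pos.2 = (x0 : Int) := by omega
    have hy0n : y0 < m.length := by omega
    have hx0n : x0 < pvL m := by omega
    have hidx : pos.1 * ((pvL m : Int) + 1) + pos.2 = ((y0 * (pvL m + 1) + x0 : Nat) : Int) := by
      rw [hp1, hp2]; push_cast; ring
    rw [hidx, PySem.List.pySetD_natCast]
    rw [pv_flatten_set (pvBlocks m) (pvL m + 1) hblockK y0 x0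
      (by unfold pvBlocks; simpa using hy0n) (by omega)]
    congr 1
    -- A's blocks equal B's patched blocks
    have hmapc : (List.range m.length).map (fun (y : Nat) => pvRowA m pos (y : Int) ++ ['\n']) =
        (List.range m.length).map (fun y =>
          if y = y0 then (pvLine m y0 ++ ['\n']).set x0 '@' else pvLine m y ++ ['\n']) := by
      apply List.map_congr_left
      intro y hy
      rw [List.mem_range] at hy
      rw [pv_rowA_elem m pos y hy hrow]
      by_cases hyy : y = y0
      · rw [if_pos ⟨by omega, h3, h4⟩, if_pos hyy, hyy]
        rw [pv_set_append_left _ _ _ _ (by rw [pv_line_len m y0 hy0n hrow]; omega)]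
      · rw [if_neg (by intro hc; exact hyy (by omega)), if_neg hyy]
    have hgetD : (pvBlocks m).getD y0 [] = pvLine m y0 ++ ['\n'] := by
      unfold pvBlocks
      rw [List.getD_eq_getElem _ _ (by simpa using hy0n)]
      simp
    rw [hmapc, ← pv_set_map_range _ _ _ _ hy0n, hgetD]
    unfold pvBlocks
    rfl
  · rw [if_neg hin]
    congr 1
    unfold pvBlocks
    congr 1
    apply List.map_congr_left
    intro y hy
    rw [List.mem_range] at hy
    rw [pv_rowA_elem m pos y hy hrow]
    rw [if_neg]
    intro ⟨hc1, hc2, hc3⟩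
    exact hin ⟨by omega, by omega, hc2, hc3⟩
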